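-- pv_equiv track=rewrite | github.com/ericnerwala/Franklink | app/groupchat/features/opinion.py | _trim_offtopic_pivot
-- ===== SOURCE A (Python) =====
-- def _clean_opinion(text: str) -> str:
--     text = (text or "").strip()
--     if not text:
--         return ""
--     # Prefer a single bubble; flatten newlines.
--     text = " ".join(text.split()).lower().strip()
--     text = text.rstrip().rstrip(".!?")
--
--     if len(text) > 220:
--         trimmed = text[:220].rstrip()
--         cut = trimmed.rfind(" ")
--         if cut > 0:
--             trimmed = trimmed[:cut]
--         text = trimmed.rstrip().rstrip(".!?")
--
--     return text
--
-- def _trim_offtopic_pivot(text: str) -> str: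
--     """
--     Guardrail for direct answers: if the model tries to "pivot" into a new topic,
--     truncate the message before the pivot phrase.
--     """
--     s = " ".join((text or "").split()).strip()
--     if not s:
--         return ""
--
--     lowered = s.lower()
--     markers = (
--         "switching gears",
--         "new topic",
--         "fresh topic",
--         "quick pivot",
--         "different angle",
--     )
--     cut_at = None
--     for m in markers:
--         idx = lowered.find(m)
--         if idx == -1:
--             continue
--         cut_at = idx if cut_at is None else min(cut_at, idx)
--     if cut_at is not None and cut_at > 0:
--         s = s[:cut_at].strip()
--
--     return _clean_opinion(s)
-- ===== SOURCE B (Python) =====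
-- def _clean_opinion(text: str) -> str:
--     text = (text or "").strip()
--     if not text:
--         return ""
--     # Prefer a single bubble; flatten newlines.
--     text = " ".join(text.split()).lower().strip()
--     text = text.rstrip().rstrip(".!?")
--
--     if len(text) > 220:
--         trimmed = text[:220].rstrip()
--         cut = trimmed.rfind(" ")
--         if cut > 0:
--             trimmed = trimmed[:cut]
--         text = trimmed.rstrip().rstrip(".!?")
--
--     return text
--
--
-- _MARKERS = (
--     "switching gears",
--     "new topic",
--     "fresh topic",
--     "quick pivot",
--     "different angle",
-- )
--
--
-- def _trim_offtopic_pivot(text: str) -> str: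
--     # Single left-to-right scan: stop at the first position where any marker starts.
--     s = " ".join((text or "").split()).strip()
--     lowered = s.lower()
--     for i in range(len(lowered)):
--         if lowered.startswith(_MARKERS, i):
--             if i > 0:
--                 s = s[:i].strip()
--             break
--     return _clean_opinion(s)
-- ===== Notes on version B (the rewrite author's own statement) =====
-- stated objective: alternative
-- what changed: A scans the whole string once per marker with .find and tracks the minimum hit; B makes a single left-to-right pass over positions and stops at the first position where any marker starts (startswith with a tuple), which is the same cut index.
import Mathlib
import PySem

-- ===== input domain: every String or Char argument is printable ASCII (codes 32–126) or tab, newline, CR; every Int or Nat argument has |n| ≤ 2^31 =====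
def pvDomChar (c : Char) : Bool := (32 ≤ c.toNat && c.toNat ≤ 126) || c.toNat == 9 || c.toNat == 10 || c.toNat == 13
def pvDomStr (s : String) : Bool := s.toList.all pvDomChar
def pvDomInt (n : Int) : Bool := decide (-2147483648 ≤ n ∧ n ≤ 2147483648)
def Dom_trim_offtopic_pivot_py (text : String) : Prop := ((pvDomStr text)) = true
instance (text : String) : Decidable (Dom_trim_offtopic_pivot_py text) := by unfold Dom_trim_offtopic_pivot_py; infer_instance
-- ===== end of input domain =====

-- B replaces A's five repeated .find scans (min-tracked) by one left-to-right scan that stops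
-- at the first position where any pivot marker starts (objective: alternative; same exact result).


-- ===== PORT A =====
-- exact port of Python's str.rstrip(chars): drop characters of `chars` from the RIGHT end only
def pyRstripChars (s chars : List Char) : List Char :=
  (s.reverse.dropWhile (fun c => chars.contains c)).reverse

-- shared helper: literal port of _clean_opinion (textually identical in Source A and Source B)
def cleanOpinion (cs : List Char) : List Char :=
  let t := PySem.Chars.strip cs
  if t = [] then []
  else
    let t := PySem.Chars.strip (PySem.Chars.lower (PySem.Chars.join [' '] (PySem.Chars.split₀ t)))
    let t := pyRstripChars (PySem.Chars.rstrip t) ['.', '!', '?']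
    if 220 < t.length then
      let trimmed := PySem.Chars.rstrip (PySem.Chars.slice t none (some 220))
      let cut := PySem.Chars.rfind trimmed [' ']
      let trimmed := if 0 < cut then PySem.Chars.slice trimmed none (some cut) else trimmed
      pyRstripChars (PySem.Chars.rstrip trimmed) ['.', '!', '?']
    else t

def pivotMarkers : List (List Char) :=
  ["switching gears".toList, "new topic".toList, "fresh topic".toList,
   "quick pivot".toList, "different angle".toList]

-- A's 'for m in markers' loop: a fold over the markers tracking the minimal find position
def aFold (lowered : List Char) (ms : List (List Char)) (acc : Option Int) : Option Int :=
  ms.foldl (fun cutAt m =>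
    let idx := PySem.Chars.find lowered m
    if idx = -1 then cutAt
    else match cutAt with
      | none => some idx
      | some c => some (min c idx)) acc

def trim_offtopic_pivot_py (text : String) : String :=
  let s := PySem.Chars.strip (PySem.Chars.join [' '] (PySem.Chars.split₀ text.toList))
  if s = [] then ""
  else
    let lowered := PySem.Chars.lower s
    let cutAt : Option Int := aFold lowered pivotMarkers none
    let s := match cutAt with
      | some c => if 0 < c then PySem.Chars.strip (PySem.Chars.slice s none (some c)) else s
      | none => s
    String.ofList (cleanOpinion s)

-- ===== PORT B =====
-- Source B's 'for i in range(len(lowered)) … break' loop: structural recursion on the remaining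
-- suffix; lowered.startswith(markers, i) is the prefix test on the suffix starting at i
def scanPivot (markers : List (List Char)) : List Char → Nat → Option Nat
  | [], _ => none
  | c :: rest, i =>
    if markers.any (fun m => PySem.Chars.startswith (c :: rest) m) then some i
    else scanPivot markers rest (i + 1)

def trim_offtopic_pivot_py_alt (text : String) : String :=
  let s := PySem.Chars.strip (PySem.Chars.join [' '] (PySem.Chars.split₀ text.toList))
  let lowered := PySem.Chars.lower s
  let s := match scanPivot pivotMarkers lowered 0 with
    | some i => if 0 < i then PySem.Chars.strip (s.take i) else s
    | none => s
  String.ofList (cleanOpinion s)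

-- ===== PRECONDITION & SPEC =====
def Spec_trim_offtopic_pivot_py (text : String) (out : String) : Prop := out = trim_offtopic_pivot_py_alt text
instance (text : String) (out : String) : Decidable (Spec_trim_offtopic_pivot_py text out) := by unfold Spec_trim_offtopic_pivot_py; infer_instance

-- ===== CLAIM (what is proved, stated in full; the proofs are below) =====
def Claim_equal_trim_offtopic_pivot_py : Prop := ∀ (text : String), Dom_trim_offtopic_pivot_py text → Spec_trim_offtopic_pivot_py text (trim_offtopic_pivot_py text)

-- ===== LEMMAS AND PROOFS =====

-- some marker starts at position i of cs
def PivotAt (ms : List (List Char)) (cs : List Char) (i : Nat) : Prop :=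
  ∃ m ∈ ms, m <+: cs.drop i

theorem any_startswith_iff (ms : List (List Char)) (s : List Char) :
    (ms.any (fun m => PySem.Chars.startswith s m) = true) ↔ ∃ m ∈ ms, m <+: s := by
  simp [List.any_eq_true, PySem.Chars.startswith, List.isPrefixOf_iff_prefix]

theorem scan_shift (ms : List (List Char)) (cs : List Char) :
    ∀ k, scanPivot ms cs k = (scanPivot ms cs 0).map (· + k) := by
  induction cs with
  | nil => intro k; rfl
  | cons c rest ih =>
    intro k
    simp only [scanPivot]
    split
    · simp
    · rw [ih (k + 1), ih 1]
      cases scanPivot ms rest 0 <;> simp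
      omega

theorem scanPivot_none {ms : List (List Char)} {cs : List Char} (hms : ∀ m ∈ ms, m ≠ [])
    (h : scanPivot ms cs 0 = none) : ∀ i, ¬ PivotAt ms cs i := by
  induction cs with
  | nil =>
    intro i ⟨m, hm, hp⟩
    exact hms m hm (List.prefix_nil.mp (by simpa using hp))
  | cons c rest ih =>
    simp only [scanPivot] at h
    split at h
    · exact absurd h (by simp)
    · rename_i hany
      rw [scan_shift ms rest 1] at h
      have h0 : scanPivot ms rest 0 = none := by
        cases hh : scanPivot ms rest 0 <;> simp [hh] at h ⊢
      intro i hp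
      match i with
      | 0 =>
        exact hany ((any_startswith_iff ms (c :: rest)).mpr (by simpa [PivotAt] using hp))
      | Nat.succ i' =>
        exact ih h0 i' (by simpa [PivotAt] using hp)

theorem scanPivot_some {ms : List (List Char)} {cs : List Char} {j : Nat}
    (h : scanPivot ms cs 0 = some j) :
    PivotAt ms cs j ∧ ∀ i < j, ¬ PivotAt ms cs i := by
  induction cs generalizing j with
  | nil => simp [scanPivot] at h
  | cons c rest ih =>
    simp only [scanPivot] at h
    split at h
    · rename_i hany
      obtain rfl : j = 0 := by simpa using h.symm
      refine ⟨by simpa [PivotAt] using (any_startswith_iff ms (c :: rest)).mp hany, by omega⟩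
    · rename_i hany
      rw [scan_shift ms rest 1] at h
      obtain ⟨j', hj', rfl⟩ : ∃ j', scanPivot ms rest 0 = some j' ∧ j = j' + 1 := by
        cases hh : scanPivot ms rest 0 <;> simp [hh] at h ⊢; omega
      obtain ⟨hat, hmin⟩ := ih hj'
      refine ⟨by simpa [PivotAt] using hat, ?_⟩
      intro i hi hp
      match i with
      | 0 => exact hany ((any_startswith_iff ms (c :: rest)).mpr (by simpa [PivotAt] using hp))
      | Nat.succ i' => exact hmin i' (by omega) (by simpa [PivotAt] using hp)

theorem aFold_none_iff (cs : List Char) (ms : List (List Char)) (acc : Option Int) :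
    aFold cs ms acc = none ↔ acc = none ∧ ∀ m ∈ ms, PySem.Chars.find cs m = -1 := by
  induction ms generalizing acc with
  | nil => simp [aFold]
  | cons m ms' ih =>
    simp only [aFold, List.foldl_cons] at *
    rw [ih]
    by_cases hf : PySem.Chars.find cs m = -1
    · simp [hf]
    · cases acc <;> simp [hf]

theorem aFold_some (cs : List Char) (ms : List (List Char)) (acc : Option Int) (j : Int)
    (h : aFold cs ms acc = some j) :
    (acc = some j ∨ ∃ m ∈ ms, PySem.Chars.find cs m = j ∧ PySem.Chars.find cs m ≠ -1) ∧
    (∀ m ∈ ms, PySem.Chars.find cs m ≠ -1 → j ≤ PySem.Chars.find cs m) ∧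
    (∀ a, acc = some a → j ≤ a) := by
  induction ms generalizing acc with
  | nil => simp [aFold] at h; simp [h]
  | cons m ms' ih =>
    simp only [aFold, List.foldl_cons] at h
    by_cases hf : PySem.Chars.find cs m = -1
    · simp only [hf, if_pos] at h
      obtain ⟨h1, h2, h3⟩ := ih acc h
      refine ⟨?_, ?_, h3⟩
      · rcases h1 with h1 | ⟨m', hm', hh⟩
        · exact Or.inl h1
        · exact Or.inr ⟨m', by simp [hm'], hh⟩
      · intro m' hm' hne
        rcases List.mem_cons.mp hm' with rfl | hm'
        · exact absurd hf hne
        · exact h2 m' hm' hne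
    · rw [if_neg hf] at h
      cases acc with
      | none =>
        obtain ⟨h1, h2, h3⟩ := ih _ h
        refine ⟨?_, ?_, by simp⟩
        · rcases h1 with h1 | ⟨m', hm', hh⟩
          · exact Or.inr ⟨m, by simp, by simpa using h1, hf⟩
          · exact Or.inr ⟨m', by simp [hm'], hh⟩
        · intro m' hm' hne
          rcases List.mem_cons.mp hm' with rfl | hm'
          · have := h3 _ rfl; omega
          · exact h2 m' hm' hne
      | some c =>
        obtain ⟨h1, h2, h3⟩ := ih _ h
        have hjc : j ≤ min c (PySem.Chars.find cs m) := h3 _ rfl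
        refine ⟨?_, ?_, ?_⟩
        · rcases h1 with h1 | ⟨m', hm', hh⟩
          · have h1' : min c (PySem.Chars.find cs m) = j := by simpa using h1
            rcases min_cases c (PySem.Chars.find cs m) with ⟨he, _⟩ | ⟨he, _⟩
            · exact Or.inl (by rw [← h1', he])
            · exact Or.inr ⟨m, by simp, by omega, hf⟩
          · exact Or.inr ⟨m', by simp [hm'], hh⟩
        · intro m' hm' hne
          rcases List.mem_cons.mp hm' with rfl | hm'
          · simp at hjc; omega
          · exact h2 m' hm' hne
        · intro a ha
          injection ha with ha; subst ha
          simp at hjc; omega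

theorem infix_of_prefix_drop {m cs : List Char} {j : Nat} (hp : m <+: cs.drop j) :
    m <:+: cs := by
  have := (PySem.Chars.exists_prefix_drop_iff_isIn (s := cs) (sub := m)).mp ⟨j, hp⟩
  exact (PySem.Chars.isIn_iff_infix m cs).mp this

theorem aFold_eq_scan (cs : List Char) :
    aFold cs pivotMarkers none = (scanPivot pivotMarkers cs 0).map (fun i => (i : Int)) := by
  have hms : ∀ m ∈ pivotMarkers, m ≠ [] := by decide
  cases hs : scanPivot pivotMarkers cs 0 with
  | none =>
    show aFold cs pivotMarkers none = none
    rw [aFold_none_iff]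
    refine ⟨rfl, fun m hm => ?_⟩
    rw [PySem.Chars.find_eq_neg_one_iff]
    intro hinf
    obtain ⟨j, hp⟩ := (PySem.Chars.exists_prefix_drop_iff_isIn (s := cs) (sub := m)).mpr
      ((PySem.Chars.isIn_iff_infix m cs).mpr hinf)
    exact scanPivot_none hms hs j ⟨m, hm, hp⟩
  | some j =>
    obtain ⟨⟨m, hm, hp⟩, hmin⟩ := scanPivot_some hs
    have hfm : 0 ≤ PySem.Chars.find cs m := by
      rw [PySem.Chars.find_nonneg_iff]; exact infix_of_prefix_drop hp
    cases hv : aFold cs pivotMarkers none with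
    | none =>
      rw [aFold_none_iff] at hv
      have := hv.2 m hm
      omega
    | some v =>
      obtain ⟨h1, h2, -⟩ := aFold_some _ _ _ _ hv
      rcases h1 with h1 | ⟨m0, hm0, hfv, hne0⟩
      · exact absurd h1 (by simp)
      have hv0 : 0 ≤ v := by have := PySem.Chars.neg_one_le_find cs m0; omega
      have hspec := PySem.Chars.find_spec (s := cs) (sub := m0) (by omega)
      have hP : PivotAt pivotMarkers cs v.toNat := ⟨m0, hm0, by rw [hfv] at hspec; exact hspec.1⟩
      have hjv : j ≤ v.toNat := by
        by_contra hlt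
        exact hmin _ (by omega) hP
      have hmj : (PySem.Chars.find cs m).toNat ≤ j := by
        by_contra hlt
        exact (PySem.Chars.find_spec hfm).2 j (by omega) hp
      have hvm : v ≤ PySem.Chars.find cs m := h2 m hm (by omega)
      show _ = some ((j : Nat) : Int)
      congr 1
      omega

-- ===== VERDICT (by name: the statement is the Claim_ definition above) =====
theorem trim_offtopic_pivot_py_spec : Claim_equal_trim_offtopic_pivot_py := by
  intro text _
  show trim_offtopic_pivot_py text = trim_offtopic_pivot_py_alt text
  simp only [trim_offtopic_pivot_py, trim_offtopic_pivot_py_alt]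
  set s := PySem.Chars.strip (PySem.Chars.join [' '] (PySem.Chars.split₀ text.toList)) with hs
  by_cases hse : s = []
  · rw [if_pos hse, hse]
    rfl
  · rw [if_neg hse, aFold_eq_scan]
    cases hscan : scanPivot pivotMarkers (PySem.Chars.lower s) 0 with
    | none => rfl
    | some i =>
      cases i with
      | zero => rfl
      | succ i' =>
        have h1 : PySem.List.slice s none (some ((i' : Int) + 1)) = List.take (i' + 1) s := by
          simpa using PySem.List.slice_to_natCast (xs := s) (b := i' + 1)
        simp [h1]
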